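-- pv_equiv track=rewrite | github.com/Do-heewan/Do_ProgrammingTest | 백준/Gold/3687. 성냥개비/성냥개비.py | makeMax
-- ===== SOURCE A (Python) =====
-- def makeMax(num):
--     maxNum = [0] * 101
--     maxNum[2] = 1
--     maxNum[3] = 7
--
--     arr = [0, 0, 1, 7]
--     for i in range(4, 101):
--         for j in range(2, 4):
--             maxNum[i] = max(maxNum[i], int(str(maxNum[i-j]) + str(arr[j])))
--
--     return maxNum[num]
-- ===== SOURCE B (Python) =====
-- def makeMax(num):
--     # closed form: largest number uses digit 1 (2 sticks); an odd stick count
--     # spends 3 sticks on one leading 7. (10**k - 1) // 9 is the k-digit repunit.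
--     if num < 2:
--         return 0
--     if num % 2 == 0:
--         k = num // 2
--         return (10 ** k - 1) // 9
--     k = (num - 3) // 2
--     return 7 * 10 ** k + (10 ** k - 1) // 9
-- ===== Notes on version B (the rewrite author's own statement) =====
-- stated objective: simpler
-- what changed: Replaces the 101-entry DP table (built with string concatenation and reparsing) by a direct closed form on num's parity: a repunit of num//2 ones for even num, a leading 7 plus (num-3)//2 ones for odd num, 0 for num < 2.
-- outside the precondition, e.g. on makeMax(-1): A returns 11111111111111111111111111111111111111111111111111, B returns 0; on makeMax(-39): A returns 1111111111111111111111111111111, B returns 0; on makeMax(-99): A returns 1, B returns 0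
import Mathlib
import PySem

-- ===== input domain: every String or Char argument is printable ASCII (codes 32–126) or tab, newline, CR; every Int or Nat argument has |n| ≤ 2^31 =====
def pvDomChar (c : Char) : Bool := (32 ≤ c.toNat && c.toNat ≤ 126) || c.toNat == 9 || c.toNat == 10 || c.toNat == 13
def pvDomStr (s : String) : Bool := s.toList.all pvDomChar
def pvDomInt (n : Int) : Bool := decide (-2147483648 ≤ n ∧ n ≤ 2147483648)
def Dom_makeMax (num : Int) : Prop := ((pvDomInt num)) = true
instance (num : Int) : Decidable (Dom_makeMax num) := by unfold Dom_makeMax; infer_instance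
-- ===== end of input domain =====

-- B replaces A's 101-entry DP table (string concatenation + reparsing) by a parity closed form: simpler.


-- ===== PORT A =====
-- int(str(a) + str(b)); the parse never fails here (both arguments are nonnegative decimals)
def pvCat (a b : Int) : Int := (PySem.Int.ofStr? (PySem.Int.toStr a ++ PySem.Int.toStr b)).getD 0

-- the DP table A builds before indexing it (independent of num)
def pvTable : List Int :=
  let maxNum : List Int := ((List.replicate 101 (0 : Int)).set 2 1).set 3 7
  let arr : List Int := [0, 0, 1, 7]
  (PySem.List.pyRange 4 101 1).foldl (fun m i =>
    (PySem.List.pyRange 2 4 1).foldl (fun m j =>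
      PySem.List.pySetD m i (max (PySem.List.pyGetD m i 0)
        (pvCat (PySem.List.pyGetD m (i - j) 0) (PySem.List.pyGetD arr j 0)))) m) maxNum

def makeMax (num : Int) : Int := PySem.List.pyGetD pvTable num 0

-- ===== PORT B =====
def makeMax_alt (num : Int) : Int :=
  if num < 2 then 0
  else if PySem.Int.mod num 2 = 0 then
    let k := PySem.Int.floordiv num 2
    PySem.Int.floordiv (10 ^ k.toNat - 1) 9      -- k ≥ 0 here, so toNat is exact
  else
    let k := PySem.Int.floordiv (num - 3) 2
    7 * 10 ^ k.toNat + PySem.Int.floordiv (10 ^ k.toNat - 1) 9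

-- ===== PRECONDITION & SPEC =====
-- Pre_ restricts to the problem's natural domain 0 ≤ num ≤ 100 (the only stick counts the
-- table covers): for num in -101..-1 A still returns a value, but only via Python's
-- negative-index wraparound into the DP table, an artefact of the list representation;
-- num ≤ -102 or num ≥ 101 raise IndexError.
def Pre_makeMax (num : Int) : Prop := 0 ≤ num ∧ num < 101
instance (num : Int) : Decidable (Pre_makeMax num) := by unfold Pre_makeMax; infer_instance
def pvWitness_makeMax : Int := 7
def Spec_makeMax (num : Int) (out : Int) : Prop := out = makeMax_alt num
instance (num : Int) (out : Int) : Decidable (Spec_makeMax num out) := by unfold Spec_makeMax; infer_instance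

-- ===== CLAIM (what is proved, stated in full; the proofs are below) =====
def Claim_equal_makeMax : Prop := ∀ (num : Int), Dom_makeMax num → Pre_makeMax num → Spec_makeMax num (makeMax num)

-- ===== LEMMAS AND PROOFS =====
-- the table A builds, evaluated once
def pvTableLit : List Int := [0, 0, 1, 7, 11, 71, 111, 711, 1111, 7111, 11111, 71111, 111111, 711111, 1111111, 7111111, 11111111, 71111111, 111111111, 711111111, 1111111111, 7111111111, 11111111111, 71111111111, 111111111111, 711111111111, 1111111111111, 7111111111111, 11111111111111, 71111111111111, 111111111111111, 711111111111111, 1111111111111111, 7111111111111111, 11111111111111111, 71111111111111111, 111111111111111111, 711111111111111111, 1111111111111111111, 7111111111111111111, 11111111111111111111, 71111111111111111111, 111111111111111111111, 711111111111111111111, 1111111111111111111111, 7111111111111111111111, 11111111111111111111111, 71111111111111111111111, 111111111111111111111111, 711111111111111111111111, 1111111111111111111111111, 7111111111111111111111111, 11111111111111111111111111, 71111111111111111111111111, 111111111111111111111111111, 711111111111111111111111111, 1111111111111111111111111111, 7111111111111111111111111111, 11111111111111111111111111111, 71111111111111111111111111111, 111111111111111111111111111111, 711111111111111111111111111111, 1111111111111111111111111111111,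 7111111111111111111111111111111, 11111111111111111111111111111111, 71111111111111111111111111111111, 111111111111111111111111111111111, 711111111111111111111111111111111, 1111111111111111111111111111111111, 7111111111111111111111111111111111, 11111111111111111111111111111111111, 71111111111111111111111111111111111, 111111111111111111111111111111111111, 711111111111111111111111111111111111, 1111111111111111111111111111111111111, 7111111111111111111111111111111111111, 11111111111111111111111111111111111111, 71111111111111111111111111111111111111, 111111111111111111111111111111111111111, 711111111111111111111111111111111111111, 1111111111111111111111111111111111111111, 7111111111111111111111111111111111111111, 11111111111111111111111111111111111111111, 71111111111111111111111111111111111111111, 111111111111111111111111111111111111111111, 711111111111111111111111111111111111111111, 1111111111111111111111111111111111111111111, 7111111111111111111111111111111111111111111, 11111111111111111111111111111111111111111111, 71111111111111111111111111111111111111111111, 111111111111111111111111111111111111111111111, 711111111111111111111111111111111111111111111, 1111111111111111111111111111111111111111111111, 7111111111111111111111111111111111111111111111, 11111111111111111111111111111111111111111111111, 71111111111111111111111111111111111111111111111, 111111111111111111111111111111111111111111111111, 711111111111111111111111111111111111111111111111, 1111111111111111111111111111111111111111111111111, 7111111111111111111111111111111111111111111111111, 1111111111111111111111111111111111111111111111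1111]

set_option maxRecDepth 100000 in
set_option maxHeartbeats 4000000 in
theorem pvTable_eq : pvTable = pvTableLit := by decide

set_option maxRecDepth 10000 in
theorem pv_key : ∀ n : Nat, n < 101 → PySem.List.pyGetD pvTableLit (n : Int) 0 = makeMax_alt (n : Int) := by decide

-- ===== VERDICT (by name: the statement is the Claim_ definition above) =====
theorem makeMax_spec : Claim_equal_makeMax := by
  intro num _ hpre
  unfold Pre_makeMax at hpre
  unfold Spec_makeMax makeMax
  rw [pvTable_eq]
  have h : num = ((num.toNat : Nat) : Int) := by omega
  rw [h]
  exact pv_key num.toNat (by omega)
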